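-- pv_equiv track=rewrite | github.com/adidoesnt/cs4211-pokemon-battle-model | pokemon_battle_pcsp_generator.py | rank_moves
-- ===== SOURCE A (Python) =====
-- def rank_moves(damage_list):
--     rank_list = [-1, -1, -1, -1]
--     for i in range(4):
--         count = 0
--         for j in range(4):
--             if(i == j):
--                 continue
--             if(damage_list[i] > damage_list[j]):
--                 count = count + 1
--         rank_list[i] = count
--
--     has_duplicates = True
--     while(has_duplicates):
--         has_duplicates = False
--         for i in range(4):
--             count = 0
--             for j in range(4):
--                 if(i == j):
--                     continue
--                 if(rank_list[i] == rank_list[j]):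
--                     count = count + 1
--                     has_duplicates = True
--             rank_list[i] = rank_list[i] + count
--     return rank_list
-- ===== SOURCE B (Python) =====
-- def rank_moves(damage_list):
--     # Initial strictly-greater counts (competition ranking), then place indices
--     # sorted by (count desc, index asc) at ranks 3..0 directly.
--     counts = [sum(1 for j in range(4) if i != j and damage_list[i] > damage_list[j])
--               for i in range(4)]
--     order = sorted(range(4), key=lambda i: (-counts[i], i))
--     ranks = [0, 0, 0, 0]
--     for p, i in enumerate(order):
--         ranks[i] = 3 - p
--     return ranks
-- ===== Notes on version B (the rewrite author's own statement) =====
-- stated objective: simpler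
-- what changed: Replaced A's in-place duplicate-relaxation while-loop (repeated sweeps adding duplicate counts until ranks are distinct) by a direct sort: indices sorted by (-count, index) are assigned ranks 3..0 in one pass.
import Mathlib
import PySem

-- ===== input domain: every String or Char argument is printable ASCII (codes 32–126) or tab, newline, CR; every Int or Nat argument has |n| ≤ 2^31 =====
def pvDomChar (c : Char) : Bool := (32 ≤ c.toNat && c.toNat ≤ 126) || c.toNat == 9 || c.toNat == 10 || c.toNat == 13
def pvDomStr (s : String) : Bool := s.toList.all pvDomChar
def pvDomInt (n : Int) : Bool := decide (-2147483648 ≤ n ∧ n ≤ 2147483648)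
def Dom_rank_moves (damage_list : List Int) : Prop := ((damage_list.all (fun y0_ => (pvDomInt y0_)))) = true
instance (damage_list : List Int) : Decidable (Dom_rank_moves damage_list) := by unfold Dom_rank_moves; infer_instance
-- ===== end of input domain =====

-- B replaces A's in-place duplicate-relaxation while-loop by a single sort of the four
-- indices by (-count, index) with direct rank assignment (objective: simpler).

-- ===== PORT A =====
-- one sweep of A's while-loop body: state is (rank_list, has_duplicates)
def rankSweep (rl : List Int) : List Int × Bool :=
  (PySem.List.pyRange 0 4 1).foldl
    (fun (st : List Int × Bool) i =>
      let cd :=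
        (PySem.List.pyRange 0 4 1).foldl
          (fun (cd : Int × Bool) j =>
            if i == j then cd
            else if PySem.List.pyGetD st.1 i 0 == PySem.List.pyGetD st.1 j 0 then (cd.1 + 1, true)
            else cd)
          ((0 : Int), st.2)
      (PySem.List.pySetD st.1 i (PySem.List.pyGetD st.1 i 0 + cd.1), cd.2))
    (rl, false)

-- A's 'while has_duplicates' loop; fuel 8 exceeds the sweeps the loop can take on any
-- input admitted by Pre_ (at most 2, proved implicitly by the equivalence below)
def rankWhile : Nat → List Int → List Int
  | 0, rl => rl
  | fuel + 1, rl =>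
      let st := rankSweep rl
      if st.2 then rankWhile fuel st.1 else st.1

-- indexing is via pyGetD with default 0: Pre_ guarantees indices 0..3 are in range,
-- so the default is never used (Python raises IndexError exactly outside Pre_)
def rank_moves (damage_list : List Int) : List Int :=
  let rank_list : List Int := [-1, -1, -1, -1]
  let rank_list :=
    (PySem.List.pyRange 0 4 1).foldl
      (fun rl i =>
        let count :=
          (PySem.List.pyRange 0 4 1).foldl
            (fun (count : Int) j =>
              if i == j then count
              else if PySem.List.pyGetD damage_list j 0 < PySem.List.pyGetD damage_list i 0 then count + 1
              else count)
            0
        PySem.List.pySetD rl i count)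
      rank_list
  rankWhile 8 rank_list

-- ===== PORT B =====
-- sorted(range(4), key=lambda i: (-counts[i], i))
def altOrder (counts : List Int) : List Int :=
  PySem.List.sorted2 (PySem.List.pyRange 0 4 1)
    (fun i => -(PySem.List.pyGetD counts i 0)) (fun i => i) false

-- for p, i in enumerate(order): ranks[i] = 3 - p
def altRanks (order : List Int) : List Int :=
  (PySem.List.enumerate order 0).foldl
    (fun ranks pi => PySem.List.pySetD ranks pi.2 (3 - pi.1)) [0, 0, 0, 0]

def rank_moves_alt (damage_list : List Int) : List Int :=
  let counts : List Int :=
    (PySem.List.pyRange 0 4 1).map (fun i =>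
      ((PySem.List.pyRange 0 4 1).map (fun j =>
        if i ≠ j ∧ PySem.List.pyGetD damage_list j 0 < PySem.List.pyGetD damage_list i 0 then (1 : Int)
        else 0)).sum)
  altRanks (altOrder counts)

-- ===== PRECONDITION & SPEC =====
-- Pre_ excludes exactly the lists of length < 4, on which A raises IndexError
def Pre_rank_moves (damage_list : List Int) : Prop := 4 ≤ damage_list.length
instance (damage_list : List Int) : Decidable (Pre_rank_moves damage_list) := by unfold Pre_rank_moves; infer_instance
def pvWitness_rank_moves : List Int := [3, 1, 2, 1]

def Spec_rank_moves (damage_list : List Int) (out : List Int) : Prop := out = rank_moves_alt damage_list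
instance (damage_list : List Int) (out : List Int) : Decidable (Spec_rank_moves damage_list out) := by unfold Spec_rank_moves; infer_instance

-- ===== CLAIM (what is proved, stated in full; the proofs are below) =====
def Claim_equal_rank_moves : Prop := ∀ (damage_list : List Int), Dom_rank_moves damage_list → Pre_rank_moves damage_list → Spec_rank_moves damage_list (rank_moves damage_list)

-- ===== LEMMAS AND PROOFS =====

-- the initial strictly-greater count of x against a, b, c, in the exact nested shape
-- A's inner for-loop produces
def pvC (x a b c : Int) : Int :=
  if c < x then
    (if b < x then (if a < x then (0 : Int) + 1 else 0) + 1 else if a < x then 0 + 1 else 0) + 1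
  else if b < x then (if a < x then 0 + 1 else 0) + 1
  else if a < x then 0 + 1 else 0

-- A's first phase computes exactly the pvC counts
theorem pvAn (d0 d1 d2 d3 : Int) (rest : List Int) :
    rank_moves (d0 :: d1 :: d2 :: d3 :: rest) =
      rankWhile 8 [pvC d0 d1 d2 d3, pvC d1 d0 d2 d3, pvC d2 d0 d1 d3, pvC d3 d0 d1 d2] := by
  have hr : PySem.List.pyRange 0 4 1 = [0, 1, 2, 3] := by decide
  simp only [rank_moves, hr, List.foldl_cons, List.foldl_nil, PySem.List.pyGetD_ofNat',
    List.getD]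
  norm_num
  rfl

-- B's counts in the shape its map/sum reduces to, re-expressed as pvC
theorem pvBridgeG (x a b c : Int) :
    ((if a < x then (1 : Int) else 0) + ((if b < x then (1 : Int) else 0) + if c < x then (1 : Int) else 0)) = pvC x a b c := by
  unfold pvC; split_ifs <;> omega

theorem pvBn (d0 d1 d2 d3 : Int) (rest : List Int) :
    rank_moves_alt (d0 :: d1 :: d2 :: d3 :: rest) =
      altRanks (altOrder [pvC d0 d1 d2 d3, pvC d1 d0 d2 d3, pvC d2 d0 d1 d3, pvC d3 d0 d1 d2]) := by
  have hr : PySem.List.pyRange 0 4 1 = [0, 1, 2, 3] := by decide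
  simp only [rank_moves_alt, hr, List.map_cons, List.map_nil, List.sum_cons, List.sum_nil,
    PySem.List.pyGetD_ofNat', List.getD]
  norm_num
  rw [pvBridgeG, pvBridgeG, pvBridgeG, pvBridgeG]

-- pvC preserves comparisons: twelve ordered-pair transfer facts
theorem pvLt10 (d0 d1 d2 d3 : Int) : pvC d1 d0 d2 d3 < pvC d0 d1 d2 d3 ↔ d1 < d0 := by
  unfold pvC; split_ifs <;> omega
theorem pvLt01 (d0 d1 d2 d3 : Int) : pvC d0 d1 d2 d3 < pvC d1 d0 d2 d3 ↔ d0 < d1 := by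
  unfold pvC; split_ifs <;> omega
theorem pvLt20 (d0 d1 d2 d3 : Int) : pvC d2 d0 d1 d3 < pvC d0 d1 d2 d3 ↔ d2 < d0 := by
  unfold pvC; split_ifs <;> omega
theorem pvLt02 (d0 d1 d2 d3 : Int) : pvC d0 d1 d2 d3 < pvC d2 d0 d1 d3 ↔ d0 < d2 := by
  unfold pvC; split_ifs <;> omega
theorem pvLt30 (d0 d1 d2 d3 : Int) : pvC d3 d0 d1 d2 < pvC d0 d1 d2 d3 ↔ d3 < d0 := by
  unfold pvC; split_ifs <;> omega
theorem pvLt03 (d0 d1 d2 d3 : Int) : pvC d0 d1 d2 d3 < pvC d3 d0 d1 d2 ↔ d0 < d3 := by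
  unfold pvC; split_ifs <;> omega
theorem pvLt21 (d0 d1 d2 d3 : Int) : pvC d2 d0 d1 d3 < pvC d1 d0 d2 d3 ↔ d2 < d1 := by
  unfold pvC; split_ifs <;> omega
theorem pvLt12 (d0 d1 d2 d3 : Int) : pvC d1 d0 d2 d3 < pvC d2 d0 d1 d3 ↔ d1 < d2 := by
  unfold pvC; split_ifs <;> omega
theorem pvLt31 (d0 d1 d2 d3 : Int) : pvC d3 d0 d1 d2 < pvC d1 d0 d2 d3 ↔ d3 < d1 := by
  unfold pvC; split_ifs <;> omega
theorem pvLt13 (d0 d1 d2 d3 : Int) : pvC d1 d0 d2 d3 < pvC d3 d0 d1 d2 ↔ d1 < d3 := by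
  unfold pvC; split_ifs <;> omega
theorem pvLt32 (d0 d1 d2 d3 : Int) : pvC d3 d0 d1 d2 < pvC d2 d0 d1 d3 ↔ d3 < d2 := by
  unfold pvC; split_ifs <;> omega
theorem pvLt23 (d0 d1 d2 d3 : Int) : pvC d2 d0 d1 d3 < pvC d3 d0 d1 d2 ↔ d2 < d3 := by
  unfold pvC; split_ifs <;> omega

-- pvC only looks at the comparison pattern of its arguments
theorem pvCongr (x a b c X A B C : Int) (ha : A < X ↔ a < x) (hb : B < X ↔ b < x)
    (hc : C < X ↔ c < x) : pvC X A B C = pvC x a b c := by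
  unfold pvC; split_ifs <;> omega

-- applying pvC to the counts gives back the counts (competition counts are idempotent)
theorem pvIdem0 (d0 d1 d2 d3 : Int) :
    pvC (pvC d0 d1 d2 d3) (pvC d1 d0 d2 d3) (pvC d2 d0 d1 d3) (pvC d3 d0 d1 d2) = pvC d0 d1 d2 d3 :=
  pvCongr d0 d1 d2 d3 _ _ _ _ (pvLt10 d0 d1 d2 d3) (pvLt20 d0 d1 d2 d3) (pvLt30 d0 d1 d2 d3)
theorem pvIdem1 (d0 d1 d2 d3 : Int) :
    pvC (pvC d1 d0 d2 d3) (pvC d0 d1 d2 d3) (pvC d2 d0 d1 d3) (pvC d3 d0 d1 d2) = pvC d1 d0 d2 d3 :=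
  pvCongr d1 d0 d2 d3 _ _ _ _ (pvLt01 d0 d1 d2 d3) (pvLt21 d0 d1 d2 d3) (pvLt31 d0 d1 d2 d3)
theorem pvIdem2 (d0 d1 d2 d3 : Int) :
    pvC (pvC d2 d0 d1 d3) (pvC d0 d1 d2 d3) (pvC d1 d0 d2 d3) (pvC d3 d0 d1 d2) = pvC d2 d0 d1 d3 :=
  pvCongr d2 d0 d1 d3 _ _ _ _ (pvLt02 d0 d1 d2 d3) (pvLt12 d0 d1 d2 d3) (pvLt32 d0 d1 d2 d3)
theorem pvIdem3 (d0 d1 d2 d3 : Int) :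
    pvC (pvC d3 d0 d1 d2) (pvC d0 d1 d2 d3) (pvC d1 d0 d2 d3) (pvC d2 d0 d1 d3) = pvC d3 d0 d1 d2 :=
  pvCongr d3 d0 d1 d2 _ _ _ _ (pvLt03 d0 d1 d2 d3) (pvLt13 d0 d1 d2 d3) (pvLt23 d0 d1 d2 d3)

theorem pvBounds (x a b c : Int) : 0 ≤ pvC x a b c ∧ pvC x a b c < 4 := by
  unfold pvC; split_ifs <;> omega

-- the 75 count vectors realizable as initial competition counts of 4 values
def pvReal : List (List Int) := [[0, 0, 0, 0],
  [0, 0, 0, 3],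
  [0, 0, 3, 0],
  [0, 0, 2, 2],
  [0, 0, 2, 3],
  [0, 0, 3, 2],
  [0, 3, 0, 0],
  [0, 2, 0, 2],
  [0, 2, 0, 3],
  [0, 2, 2, 0],
  [0, 1, 1, 1],
  [0, 1, 1, 3],
  [0, 2, 3, 0],
  [0, 1, 3, 1],
  [0, 1, 2, 2],
  [0, 1, 2, 3],
  [0, 1, 3, 2],
  [0, 3, 0, 2],
  [0, 3, 2, 0],
  [0, 3, 1, 1],
  [0, 2, 1, 2],
  [0, 2, 1, 3],
  [0, 2, 2, 1],
  [0, 2, 3, 1],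
  [0, 3, 1, 2],
  [0, 3, 2, 1],
  [3, 0, 0, 0],
  [2, 0, 0, 2],
  [2, 0, 0, 3],
  [2, 0, 2, 0],
  [1, 0, 1, 1],
  [1, 0, 1, 3],
  [2, 0, 3, 0],
  [1, 0, 3, 1],
  [1, 0, 2, 2],
  [1, 0, 2, 3],
  [1, 0, 3, 2],
  [2, 2, 0, 0],
  [1, 1, 0, 1],
  [1, 1, 0, 3],
  [1, 1, 1, 0],
  [1, 1, 3, 0],
  [2, 3, 0, 0],
  [1, 3, 0, 1],
  [1, 2, 0, 2],
  [1, 2, 0, 3],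
  [1, 3, 1, 0],
  [1, 2, 2, 0],
  [1, 2, 3, 0],
  [1, 3, 0, 2],
  [1, 3, 2, 0],
  [3, 0, 0, 2],
  [3, 0, 2, 0],
  [3, 0, 1, 1],
  [2, 0, 1, 2],
  [2, 0, 1, 3],
  [2, 0, 2, 1],
  [2, 0, 3, 1],
  [3, 2, 0, 0],
  [3, 1, 0, 1],
  [2, 1, 0, 2],
  [2, 1, 0, 3],
  [3, 1, 1, 0],
  [2, 1, 2, 0],
  [2, 1, 3, 0],
  [2, 2, 0, 1],
  [2, 2, 1, 0],
  [2, 3, 0, 1],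
  [2, 3, 1, 0],
  [3, 0, 1, 2],
  [3, 0, 2, 1],
  [3, 1, 0, 2],
  [3, 1, 2, 0],
  [3, 2, 0, 1],
  [3, 2, 1, 0]]

-- the finite core: on every realizable count vector the two tails agree
theorem pvKeyR : (pvReal.all (fun v => decide (rankWhile 8 v = altRanks (altOrder v)))) = true := by
  decide

theorem pvMem : ∀ a b c d : Fin 4,
    [pvC ((a : Nat) : Int) ((b : Nat) : Int) ((c : Nat) : Int) ((d : Nat) : Int),
      pvC ((b : Nat) : Int) ((a : Nat) : Int) ((c : Nat) : Int) ((d : Nat) : Int),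
      pvC ((c : Nat) : Int) ((a : Nat) : Int) ((b : Nat) : Int) ((d : Nat) : Int),
      pvC ((d : Nat) : Int) ((a : Nat) : Int) ((b : Nat) : Int) ((c : Nat) : Int)] ∈ pvReal := by
  decide

theorem pvKeyV (v : List Int) (h : v ∈ pvReal) : rankWhile 8 v = altRanks (altOrder v) :=
  of_decide_eq_true (List.all_eq_true.mp pvKeyR v h)

theorem pvKey2 (a b c d : Fin 4) (x0 x1 x2 x3 : Int)
    (h0 : x0 = pvC ((a : Nat) : Int) ((b : Nat) : Int) ((c : Nat) : Int) ((d : Nat) : Int))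
    (h1 : x1 = pvC ((b : Nat) : Int) ((a : Nat) : Int) ((c : Nat) : Int) ((d : Nat) : Int))
    (h2 : x2 = pvC ((c : Nat) : Int) ((a : Nat) : Int) ((b : Nat) : Int) ((d : Nat) : Int))
    (h3 : x3 = pvC ((d : Nat) : Int) ((a : Nat) : Int) ((b : Nat) : Int) ((c : Nat) : Int)) :
    rankWhile 8 [x0, x1, x2, x3] = altRanks (altOrder [x0, x1, x2, x3]) := by
  subst h0; subst h1; subst h2; subst h3
  exact pvKeyV _ (pvMem a b c d)

theorem pvTransfer (c0 c1 c2 c3 : Int)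
    (h0 : pvC c0 c1 c2 c3 = c0) (h1 : pvC c1 c0 c2 c3 = c1)
    (h2 : pvC c2 c0 c1 c3 = c2) (h3 : pvC c3 c0 c1 c2 = c3)
    (b0 : 0 ≤ c0 ∧ c0 < 4) (b1 : 0 ≤ c1 ∧ c1 < 4)
    (b2 : 0 ≤ c2 ∧ c2 < 4) (b3 : 0 ≤ c3 ∧ c3 < 4) :
    rankWhile 8 [c0, c1, c2, c3] = altRanks (altOrder [c0, c1, c2, c3]) := by
  have ea : (((⟨c0.toNat, by omega⟩ : Fin 4) : Nat) : Int) = c0 := by simp; omega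
  have eb : (((⟨c1.toNat, by omega⟩ : Fin 4) : Nat) : Int) = c1 := by simp; omega
  have ec : (((⟨c2.toNat, by omega⟩ : Fin 4) : Nat) : Int) = c2 := by simp; omega
  have ed : (((⟨c3.toNat, by omega⟩ : Fin 4) : Nat) : Int) = c3 := by simp; omega
  exact pvKey2 ⟨c0.toNat, by omega⟩ ⟨c1.toNat, by omega⟩ ⟨c2.toNat, by omega⟩ ⟨c3.toNat, by omega⟩
    c0 c1 c2 c3 (by rw [ea, eb, ec, ed]; exact h0.symm) (by rw [ea, eb, ec, ed]; exact h1.symm)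
    (by rw [ea, eb, ec, ed]; exact h2.symm) (by rw [ea, eb, ec, ed]; exact h3.symm)

theorem pvMain (d0 d1 d2 d3 : Int) (rest : List Int) :
    rank_moves (d0 :: d1 :: d2 :: d3 :: rest) = rank_moves_alt (d0 :: d1 :: d2 :: d3 :: rest) := by
  rw [pvAn d0 d1 d2 d3 rest, pvBn d0 d1 d2 d3 rest]
  exact pvTransfer _ _ _ _ (pvIdem0 d0 d1 d2 d3) (pvIdem1 d0 d1 d2 d3)
    (pvIdem2 d0 d1 d2 d3) (pvIdem3 d0 d1 d2 d3)
    (pvBounds d0 d1 d2 d3) (pvBounds d1 d0 d2 d3) (pvBounds d2 d0 d1 d3) (pvBounds d3 d0 d1 d2)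

-- ===== VERDICT (by name: the statement is the Claim_ definition above) =====
theorem rank_moves_spec : Claim_equal_rank_moves := by
  unfold Claim_equal_rank_moves
  intro dl _ hpre
  unfold Spec_rank_moves
  match dl, hpre with
  | d0 :: d1 :: d2 :: d3 :: rest, _ => exact pvMain d0 d1 d2 d3 rest
  | [], h => simp [Pre_rank_moves] at h
  | [_], h => simp [Pre_rank_moves] at h
  | [_, _], h => simp [Pre_rank_moves] at h
  | [_, _, _], h => simp [Pre_rank_moves] at h
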